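-- pv_equiv track=rewrite | github.com/SevenPok/Proyecto_1_LF | Metodos.py | gramatica
-- ===== SOURCE A (Python) =====
-- def gramatica(cadena,NT,T):
--     estado = 0
--     for caracter in cadena:
--         if estado == 0:
--             if caracter in NT:
--                 estado = 1
--             else:
--                 return False
--         elif estado == 1:
--             if caracter == '>':
--                 estado = 2
--             else:
--                 return False
--         elif estado == 2:
--             if caracter in NT or caracter in T:
--                 estado = 3
--             elif caracter == ' ':
--                 estado = 4
--             else:
--                 return False
--         elif estado == 3:
--             if caracter in NT or caracter in T:
--                 estado = 3
--             elif caracter == '|':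
--                 estado = 5
--             else:
--                 return False
--         elif estado == 5:
--             if caracter in NT or caracter in T:
--                 estado = 3
--             elif caracter == ' ':
--                 estado = 4
--             else:
--                 return False
--         else:
--             return False
--
--     if estado == 3 or estado == 4:
--         return True
--     else:
--         return False
-- ===== SOURCE B (Python) =====
-- def gramatica(cadena, NT, T):
--     # Parse by splitting: head "X>" then body = tokens separated by '|' bars,
--     # a bar being '|' only when '|' is not itself a grammar symbol.
--     S = set(NT) | set(T)
--     if len(cadena) < 3 or cadena[0] not in NT or cadena[1] != '>':
--         return False
--     parts = []
--     cur = ''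
--     for c in cadena[2:]:
--         if c == '|' and c not in S:
--             parts.append(cur)
--             cur = ''
--         else:
--             cur += c
--     parts.append(cur)
--
--     def ok_token(p):
--         return p != '' and all(ch in S for ch in p)
--
--     if not all(ok_token(p) for p in parts[:-1]):
--         return False
--     last = parts[-1]
--     return ok_token(last) or last == ' '
-- ===== Notes on version B (the rewrite author's own statement) =====
-- stated objective: alternative
-- what changed: Replaces the per-character 6-state machine by a direct parse: check the 'X>' head, split the body into '|'-separated parts in one pass, then validate all parts as symbol tokens (allowing a lone trailing ' ' part), instead of threading an explicit state variable through every character.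
import Mathlib
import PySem

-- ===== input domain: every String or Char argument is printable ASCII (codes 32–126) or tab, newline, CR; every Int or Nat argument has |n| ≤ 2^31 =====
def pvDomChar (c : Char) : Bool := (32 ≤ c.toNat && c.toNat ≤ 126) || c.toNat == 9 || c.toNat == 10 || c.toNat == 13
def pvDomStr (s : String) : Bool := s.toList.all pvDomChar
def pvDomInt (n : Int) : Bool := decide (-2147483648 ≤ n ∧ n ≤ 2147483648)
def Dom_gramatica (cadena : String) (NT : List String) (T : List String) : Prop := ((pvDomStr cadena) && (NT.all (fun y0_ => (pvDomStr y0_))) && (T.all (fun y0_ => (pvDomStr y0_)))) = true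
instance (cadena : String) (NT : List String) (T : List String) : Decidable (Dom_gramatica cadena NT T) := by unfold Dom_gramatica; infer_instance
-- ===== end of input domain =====

-- B replaces A's per-character 6-state machine by a head check plus a split of the body
-- into '|'-separated tokens validated wholesale (objective: alternative decomposition; same cost).

-- ===== PORT A =====
-- one step of the state machine; `none` = the loop's early `return False`
def gramStep (NT T : List String) (st : Option Nat) (c : Char) : Option Nat :=
  match st with
  | some 0 => if String.mk [c] ∈ NT then some 1 else none
  | some 1 => if c = '>' then some 2 else none
  | some 2 => if String.mk [c] ∈ NT ∨ String.mk [c] ∈ T then some 3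
              else if c = ' ' then some 4 else none
  | some 3 => if String.mk [c] ∈ NT ∨ String.mk [c] ∈ T then some 3
              else if c = '|' then some 5 else none
  | some 5 => if String.mk [c] ∈ NT ∨ String.mk [c] ∈ T then some 3
              else if c = ' ' then some 4 else none
  | _ => none

def gramatica (cadena : String) (NT : List String) (T : List String) : Bool :=
  match cadena.toList.foldl (gramStep NT T) (some 0) with
  | some 3 => true
  | some 4 => true
  | _ => false

-- ===== PORT B =====
-- `c in S` for a one-character string
def gramMem (S : List String) (c : Char) : Bool := PySem.Set.contains S (String.mk [c])

-- Source B's splitting loop: cut the body at each '|' that is not itself a grammar symbol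
def gramSplit (S : List String) (parts : List (List Char)) (cur : List Char) :
    List Char → List (List Char)
  | [] => parts ++ [cur]
  | c :: cs =>
      if c = '|' && !gramMem S c then gramSplit S (parts ++ [cur]) [] cs
      else gramSplit S parts (cur ++ [c]) cs

-- Source B's ok_token
def gramTok (S : List String) (p : List Char) : Bool :=
  !p.isEmpty && p.all (gramMem S)

-- the final checks of Source B on the computed parts
def gramCheck (S : List String) (ps : List (List Char)) : Bool :=
  ps.dropLast.all (gramTok S) &&
    (gramTok S (ps.getLastD []) || decide (ps.getLastD [] = [' ']))

def gramatica_alt (cadena : String) (NT : List String) (T : List String) : Bool :=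
  let S : PySem.Set String := PySem.Set.union (PySem.Set.ofList NT) T
  match cadena.toList with
  | c0 :: c1 :: rest =>
      if rest = [] then false            -- len(cadena) < 3
      else if String.mk [c0] ∈ NT ∧ c1 = '>' then
        gramCheck S (gramSplit S [] [] rest)
      else false
  | _ => false                           -- len(cadena) < 3

-- ===== PRECONDITION & SPEC =====
def Spec_gramatica (cadena : String) (NT : List String) (T : List String) (out : Bool) : Prop := out = gramatica_alt cadena NT T
instance (cadena : String) (NT : List String) (T : List String) (out : Bool) : Decidable (Spec_gramatica cadena NT T out) := by unfold Spec_gramatica; infer_instance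

-- ===== CLAIM (what is proved, stated in full; the proofs are below) =====
def Claim_equal_gramatica : Prop := ∀ (cadena : String) (NT : List String) (T : List String), Dom_gramatica cadena NT T → Spec_gramatica cadena NT T (gramatica cadena NT T)

-- ===== LEMMAS AND PROOFS =====

-- the state machine, resumed from state st, read as acceptance of the suffix
def runA (NT T : List String) (st : Option Nat) (cs : List Char) : Bool :=
  match cs.foldl (gramStep NT T) st with
  | some 3 => true
  | some 4 => true
  | _ => false

-- grammar of A's body language, b = true ⇔ inside a token (state 3); b = false ⇔ state 2/5
def gOk (S : List String) (b : Bool) : List Char → Bool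
  | [] => b
  | c :: cs =>
      if gramMem S c then gOk S true cs
      else if b then (if c = '|' then gOk S false cs else false)
      else (if c = ' ' then cs.isEmpty else false)

lemma runA_cons (NT T : List String) (st : Option Nat) (c : Char) (cs : List Char) :
    runA NT T st (c :: cs) = runA NT T (gramStep NT T st c) cs := rfl

lemma gramStep_none (NT T : List String) (c : Char) : gramStep NT T none c = none := rfl

lemma gramStep_four (NT T : List String) (c : Char) : gramStep NT T (some 4) c = none := rfl

lemma runA_none (NT T : List String) (cs : List Char) : runA NT T none cs = false := by
  induction cs with
  | nil => rfl
  | cons c cs ih => rw [runA_cons, gramStep_none]; exact ih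

lemma runA_four (NT T : List String) (cs : List Char) :
    runA NT T (some 4) cs = cs.isEmpty := by
  cases cs with
  | nil => rfl
  | cons c cs => rw [runA_cons, gramStep_four, runA_none]; simp

lemma gramMem_iff (NT T : List String) (c : Char) :
    gramMem (PySem.Set.union (PySem.Set.ofList NT) T) c
      = decide (String.mk [c] ∈ NT ∨ String.mk [c] ∈ T) := by
  simp [gramMem, PySem.Set.contains_eq_listContains,
    PySem.Set.mem_union, PySem.Set.mem_ofList]

lemma runA_gOk (NT T : List String) (cs : List Char) :
    runA NT T (some 2) cs = gOk (PySem.Set.union (PySem.Set.ofList NT) T) false cs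
  ∧ runA NT T (some 3) cs = gOk (PySem.Set.union (PySem.Set.ofList NT) T) true cs
  ∧ runA NT T (some 5) cs = gOk (PySem.Set.union (PySem.Set.ofList NT) T) false cs := by
  induction cs with
  | nil => exact ⟨rfl, rfl, rfl⟩
  | cons c cs ih =>
    obtain ⟨ih2, ih3, ih5⟩ := ih
    rw [runA_cons, runA_cons, runA_cons]
    by_cases hm : String.mk [c] ∈ NT ∨ String.mk [c] ∈ T
    · simp [gramStep, hm, gOk, gramMem_iff, ih3]
    · by_cases hsp : c = ' '
      · subst hsp
        simp [gramStep, hm, gOk, gramMem_iff, runA_four, runA_none]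
      · by_cases hbar : c = '|'
        · subst hbar
          simp [gramStep, hm, hsp, gOk, gramMem_iff, ih5, runA_none]
        · simp [gramStep, hm, hsp, hbar, gOk, gramMem_iff, runA_none]

lemma gramSplit_append (S : List String) (cs : List Char) :
    ∀ parts cur, gramSplit S parts cur cs = parts ++ gramSplit S [] cur cs := by
  induction cs with
  | nil => intro parts cur; simp [gramSplit]
  | cons c cs ih =>
    intro parts cur
    by_cases hb : (c = '|' && !gramMem S c) = true
    · rw [gramSplit, gramSplit, if_pos hb, if_pos hb,
        ih (parts ++ [cur]) [], ih ([] ++ [cur]) []]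
      simp
    · rw [gramSplit, gramSplit, if_neg hb, if_neg hb,
        ih parts (cur ++ [c]), ih [] (cur ++ [c])]

lemma gramSplit_ne_nil (S : List String) (cs : List Char) :
    ∀ parts cur, gramSplit S parts cur cs ≠ [] := by
  induction cs with
  | nil => intro parts cur; simp [gramSplit]
  | cons c cs ih =>
    intro parts cur
    by_cases hb : (c = '|' && !gramMem S c) = true
    · rw [gramSplit, if_pos hb]; exact ih _ _
    · rw [gramSplit, if_neg hb]; exact ih _ _

lemma gramCheck_cons (S : List String) (p : List Char) (qs : List (List Char)) (h : qs ≠ []) :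
    gramCheck S (p :: qs) = (gramTok S p && gramCheck S qs) := by
  cases qs with
  | nil => exact absurd rfl h
  | cons q qs' =>
    simp [gramCheck, List.getLastD, Bool.and_assoc]
    rfl

lemma gramCheck_single (S : List String) (p : List Char) :
    gramCheck S [p] = (gramTok S p || decide (p = [' '])) := by
  simp [gramCheck]

-- the core invariant: Source B's split-and-check equals A's body grammar, for each shape of `cur`
lemma gramB1 (S : List String) (cs : List Char) :
    (∀ cur, cur ≠ [] → (∀ c ∈ cur, gramMem S c = true) →
        gramCheck S (gramSplit S [] cur cs) = gOk S true cs)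
  ∧ (gramCheck S (gramSplit S [] [] cs) = gOk S false cs)
  ∧ (∀ cur, (∃ b ∈ cur, gramMem S b = false) → cur ≠ [' '] →
        gramCheck S (gramSplit S [] cur cs) = false)
  ∧ (gramMem S ' ' = false → gramCheck S (gramSplit S [] [' '] cs) = cs.isEmpty) := by
  induction cs with
  | nil =>
    refine ⟨?_, ?_, ?_, ?_⟩
    · intro cur hne hall
      simp [gramSplit, gramCheck_single, gramTok, hne, List.all_eq_true.mpr hall, gOk]
    · simp [gramSplit, gramCheck_single, gramTok, gOk]
    · intro cur hbad hne
      obtain ⟨b, hb, hbm⟩ := hbad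
      have htok : gramTok S cur = false := by
        simp [gramTok]
        intro _
        exact ⟨b, hb, by simp [hbm]⟩
      simp [gramSplit, gramCheck_single, htok, hne]
    · intro hsp
      simp [gramSplit, gramCheck_single, gramTok, hsp]
  | cons c cs ih =>
    obtain ⟨ih1, ih2, ih3, ih4⟩ := ih
    have hstep : ∀ cur, gramSplit S [] cur (c :: cs) =
        if (c = '|' && !gramMem S c) = true then cur :: gramSplit S [] [] cs
        else gramSplit S [] (cur ++ [c]) cs := by
      intro cur
      by_cases hb : (c = '|' && !gramMem S c) = true
      · rw [if_pos hb, gramSplit, if_pos hb]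
        simp only [List.nil_append]
        exact gramSplit_append S cs [cur] []
      · rw [if_neg hb, gramSplit, if_neg hb]
    have hbadgrow : ∀ cur, (∃ b ∈ cur, gramMem S b = false) →
        gramCheck S (gramSplit S [] (cur ++ [c]) cs) = false := by
      rintro cur ⟨b, hb, hbm⟩
      refine ih3 (cur ++ [c]) ⟨b, by simp [hb], hbm⟩ ?_
      intro h
      have hnil : cur = [] := by
        cases cur with
        | nil => rfl
        | cons x xs => cases xs <;> simp_all
      rw [hnil] at hb
      simp at hb
    by_cases hb : (c = '|' && !gramMem S c) = true
    · -- c is a separating bar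
      have hb' := hb
      simp only [Bool.and_eq_true, decide_eq_true_eq, Bool.not_eq_true'] at hb'
      obtain ⟨hc, hcm⟩ := hb'
      subst hc
      refine ⟨?_, ?_, ?_, ?_⟩
      · intro cur hne hall
        rw [hstep, if_pos hb, gramCheck_cons S cur _ (gramSplit_ne_nil S cs [] []), ih2]
        simp [gramTok, hne, List.all_eq_true.mpr hall, gOk, hcm]
      · rw [hstep, if_pos hb, gramCheck_cons S [] _ (gramSplit_ne_nil S cs [] [])]
        simp [gramTok, gOk, hcm]
      · rintro cur ⟨b, hbmem, hbm⟩ _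
        rw [hstep, if_pos hb, gramCheck_cons S cur _ (gramSplit_ne_nil S cs [] [])]
        have htok : gramTok S cur = false := by
          simp [gramTok]
          intro _
          exact ⟨b, hbmem, by simp [hbm]⟩
        simp [htok]
      · intro hsp
        rw [hstep, if_pos hb, gramCheck_cons S [' '] _ (gramSplit_ne_nil S cs [] [])]
        simp [gramTok, hsp]
    · -- c extends the current token
      have hstep' : ∀ cur, gramSplit S [] cur (c :: cs) = gramSplit S [] (cur ++ [c]) cs := by
        intro cur; rw [hstep, if_neg hb]
      by_cases hm : gramMem S c = true
      · refine ⟨?_, ?_, ?_, ?_⟩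
        · intro cur hne hall
          rw [hstep', ih1 (cur ++ [c]) (by simp) (by
            intro x hx
            rcases List.mem_append.mp hx with h | h
            · exact hall x h
            · simp at h; subst h; exact hm)]
          simp [gOk, hm]
        · rw [hstep']
          simp only [List.nil_append]
          have h1 := ih1 [c] (by simp) (by intro x hx; simp at hx; subst hx; exact hm)
          rw [h1]
          simp [gOk, hm]
        · intro cur hbad _
          rw [hstep']; exact hbadgrow cur hbad
        · intro hsp
          rw [hstep']
          simp only [List.cons_append, List.nil_append]
          rw [ih3 [' ', c] ⟨' ', by simp, hsp⟩ (by simp)]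
          simp
      · have hm' : gramMem S c = false := by simpa using hm
        have hcbar : c ≠ '|' := by
          intro h; subst h; exact hb (by simp [hm'])
        refine ⟨?_, ?_, ?_, ?_⟩
        · intro cur hne hall
          rw [hstep', ih3 (cur ++ [c]) ⟨c, by simp, hm'⟩ (by
            intro h
            cases cur with
            | nil => exact hne rfl
            | cons x xs => cases xs <;> simp_all)]
          simp [gOk, hm', hcbar]
        · rw [hstep']
          simp only [List.nil_append]
          by_cases hsp : c = ' '
          · subst hsp
            rw [ih4 hm']
            simp [gOk, hm']
          · rw [ih3 [c] ⟨c, by simp, hm'⟩ (by simp [hsp])]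
            simp [gOk, hm', hsp]
        · intro cur hbad _
          rw [hstep']; exact hbadgrow cur hbad
        · intro hsp
          rw [hstep']
          simp only [List.cons_append, List.nil_append]
          rw [ih3 [' ', c] ⟨' ', by simp, hsp⟩ (by simp)]
          simp

lemma gramatica_eq_runA (cadena : String) (NT T : List String) :
    gramatica cadena NT T = runA NT T (some 0) cadena.toList := rfl

-- ===== VERDICT (by name: the statement is the Claim_ definition above) =====
theorem gramatica_spec : Claim_equal_gramatica := by
  intro cadena NT T _
  unfold Spec_gramatica
  rw [gramatica_eq_runA]
  unfold gramatica_alt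
  cases h : cadena.toList with
  | nil => rfl
  | cons c0 rest0 =>
    cases rest0 with
    | nil =>
      by_cases h0 : String.mk [c0] ∈ NT <;>
        simp [runA_cons, gramStep, h0, runA]
    | cons c1 rest =>
      by_cases h0 : String.mk [c0] ∈ NT
      · by_cases h1 : c1 = '>'
        · rw [runA_cons, runA_cons]
          rw [show gramStep NT T (some 0) c0 = some 1 by simp [gramStep, h0]]
          rw [show gramStep NT T (some 1) c1 = some 2 by simp [gramStep, h1]]
          rw [(runA_gOk NT T rest).1]
          cases hrest : rest with
          | nil => simp [gOk]
          | cons d ds =>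
            simp [h0, h1, (gramB1 (PySem.Set.union (PySem.Set.ofList NT) T) (d :: ds)).2.1]
        · rw [runA_cons, runA_cons]
          rw [show gramStep NT T (some 0) c0 = some 1 by simp [gramStep, h0]]
          rw [show gramStep NT T (some 1) c1 = none by simp [gramStep, h1]]
          rw [runA_none]
          simp [h0, h1]
      · rw [runA_cons]
        rw [show gramStep NT T (some 0) c0 = none by simp [gramStep, h0]]
        rw [runA_cons, gramStep_none, runA_none]
        simp [h0]
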